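-- pv_equiv track=rewrite | github.com/SuperInstance/deckboss-1 | deckboss/models.py | pick_best_local_model
-- ===== SOURCE A (Python) =====
-- def pick_best_local_model(models: list) -> str:
--     """Auto-select the best model from available local models."""
--     if not models:
--         return "phi3:mini"
--
--     # Priority order: prefer reasoning > coding > general > tiny
--     priorities = [
--         ("deepseek", "r1"),  # DeepSeek Reasoner
--         ("qwen3.5",),        # Qwen 3.5 (great general)
--         ("deepseek", "v3"),  # DeepSeek V3
--         ("qwen3",),          # Qwen 3
--         ("nemotron",),       # Nvidia Nemotron
--         ("moondream",),      # Moondream (vision)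
--         ("phi3",),           # Phi-3
--     ]
--
--     for p in priorities:
--         for m in models:
--             ml = m.lower()
--             if all(k in ml for k in p):
--                 return m
--
--     return models[0]
-- ===== SOURCE B (Python) =====
-- _PRIORITIES = [
--     ("deepseek", "r1"),
--     ("qwen3.5",),
--     ("deepseek", "v3"),
--     ("qwen3",),
--     ("nemotron",),
--     ("moondream",),
--     ("phi3",),
-- ]
--
--
-- def _rank(m):
--     ml = m.lower()
--     for i, p in enumerate(_PRIORITIES):
--         if all(k in ml for k in p):
--             return i
--     return len(_PRIORITIES)
--
--
-- def pick_best_local_model(models: list) -> str: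
--     """Auto-select the best model from available local models."""
--     if not models:
--         return "phi3:mini"
--     return min(models, key=_rank)
-- ===== Notes on version B (the rewrite author's own statement) =====
-- stated objective: simpler
-- what changed: Replaces A's nested scan-and-break over priorities x models with a rank function (index of first matching priority) and a single stable min(models, key=rank); ties and the all-unmatched case fall to the first model by min's stability.
import Mathlib
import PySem

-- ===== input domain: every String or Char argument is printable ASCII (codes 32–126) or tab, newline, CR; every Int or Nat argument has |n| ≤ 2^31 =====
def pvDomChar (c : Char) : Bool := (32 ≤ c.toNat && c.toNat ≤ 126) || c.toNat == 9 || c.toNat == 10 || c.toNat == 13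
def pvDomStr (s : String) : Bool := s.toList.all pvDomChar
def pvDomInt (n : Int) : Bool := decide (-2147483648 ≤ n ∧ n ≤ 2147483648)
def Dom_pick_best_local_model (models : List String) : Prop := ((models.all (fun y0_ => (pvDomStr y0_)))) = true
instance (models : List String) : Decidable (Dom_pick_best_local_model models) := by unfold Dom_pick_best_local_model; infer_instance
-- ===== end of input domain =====

-- B replaces A's nested priority-then-model scan with a rank key and one stable min; objective: simpler.


-- ===== PORT A =====
-- the priority table (tuples of required keywords)
def pvPriorities : List (List String) :=
  [["deepseek", "r1"], ["qwen3.5"], ["deepseek", "v3"], ["qwen3"],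
   ["nemotron"], ["moondream"], ["phi3"]]

-- `all(k in m.lower() for k in p)` (shared test expression of both Pythons)
def pvMatches (p : List String) (m : String) : Bool :=
  let ml := PySem.Str.lower m
  p.all (fun k => PySem.Str.isIn k ml)

-- A's outer loop: for p in priorities: for m in models: …return m  (inner loop = find?)
def pvLoopA : List (List String) → List String → Option String
  | [], _ => none
  | p :: ps, models =>
    match models.find? (fun m => pvMatches p m) with
    | some m => some m
    | none => pvLoopA ps models

def pick_best_local_model (models : List String) : String :=
  match models with
  | [] => "phi3:mini"
  | m0 :: rest => (pvLoopA pvPriorities (m0 :: rest)).getD m0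

-- ===== PORT B =====
-- Source B's _rank: index of the first matching priority, else len(priorities) (= findIdx)
def pvRank (m : String) : Nat := pvPriorities.findIdx (fun p => pvMatches p m)

def pick_best_local_model_alt (models : List String) : String :=
  match models with
  | [] => "phi3:mini"
  | m0 :: rest =>
    -- min(models, key=_rank): first element with minimal key
    (PySem.List.min? (m0 :: rest) pvRank).getD "phi3:mini"

-- ===== PRECONDITION & SPEC =====
def Spec_pick_best_local_model (models : List String) (out : String) : Prop := out = pick_best_local_model_alt models
instance (models : List String) (out : String) : Decidable (Spec_pick_best_local_model models out) := by unfold Spec_pick_best_local_model; infer_instance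

-- ===== CLAIM (what is proved, stated in full; the proofs are below) =====
def Claim_equal_pick_best_local_model : Prop := ∀ (models : List String), Dom_pick_best_local_model models → Spec_pick_best_local_model models (pick_best_local_model models)

-- ===== LEMMAS AND PROOFS =====

-- the fold step of PySem.List.min?
def pvStep (key : String → Nat) (acc : Option String) (x : String) : Option String :=
  match acc with
  | none => some x
  | some m => if key x < key m then some x else some m

theorem pvMin?_eq (xs : List String) (key : String → Nat) :
    PySem.List.min? xs key = xs.foldl (pvStep key) none := by
  simp only [PySem.List.min?]
  exact List.foldl_ext _ _ none (fun a b _ => by cases a <;> rfl)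

-- rank relative to an arbitrary priority suffix
def pvRankP (ps : List (List String)) (m : String) : Nat :=
  ps.findIdx (fun p => pvMatches p m)

-- accumulator of key 0 is never replaced
theorem pvStay_zero (key : String → Nat) (l : List String) (b : String) (hb : key b = 0) :
    l.foldl (pvStep key) (some b) = some b := by
  induction l with
  | nil => rfl
  | cons c l ih =>
    simp only [List.foldl_cons, pvStep, hb, Nat.not_lt_zero]
    exact ih

-- the fold returns the first element of key 0 when one exists
theorem pvMin_first_zero (key : String → Nat) (l : List String) (b m : String)
    (h : (b :: l).find? (fun x => key x == 0) = some m) :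
    l.foldl (pvStep key) (some b) = some m := by
  induction l generalizing b with
  | nil =>
    rw [List.find?_singleton] at h
    by_cases hb : key b = 0
    · simp [hb] at h; simp [h]
    · simp [hb] at h
  | cons c l ih =>
    by_cases hb : key b = 0
    · rw [List.find?_cons_of_pos (by simp [hb])] at h
      injection h with h
      subst h
      exact pvStay_zero key (c :: l) b hb
    · rw [List.find?_cons_of_neg (by simp [hb])] at h
      by_cases hc : key c = 0
      · rw [List.find?_cons_of_pos (by simp [hc])] at h
        injection h with h
        subst h
        have hstep : pvStep key (some b) c = some c := by
          simp [pvStep, hc, Nat.pos_of_ne_zero hb]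
        rw [List.foldl_cons, hstep]
        exact pvStay_zero key l c hc
      · rw [List.find?_cons_of_neg (by simp [hc])] at h
        simp only [List.foldl_cons]
        by_cases hlt : key c < key b
        · simp only [pvStep, if_pos hlt]
          exact ih c (by rw [List.find?_cons_of_neg (by simp [hc])]; exact h)
        · simp only [pvStep, if_neg hlt]
          exact ih b (by rw [List.find?_cons_of_neg (by simp [hb])]; exact h)

-- shifting every key by +1 on the relevant elements does not change the fold
theorem pvMin_shift (key1 key2 : String → Nat) (l : List String) (b : String)
    (h : ∀ x ∈ b :: l, key1 x = key2 x + 1) :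
    l.foldl (pvStep key1) (some b) = l.foldl (pvStep key2) (some b) := by
  induction l generalizing b with
  | nil => rfl
  | cons c l ih =>
    have hb := h b (by simp)
    have hc := h c (by simp)
    have hiff : (key1 c < key1 b) = (key2 c < key2 b) := by
      rw [hb, hc]; simp
    simp only [List.foldl_cons, pvStep, hiff]
    by_cases hlt : key2 c < key2 b
    · rw [if_pos hlt]
      exact ih c (fun x hx => h x (by simp only [List.mem_cons] at hx ⊢; tauto))
    · rw [if_neg hlt]
      exact ih b (fun x hx => h x (by simp only [List.mem_cons] at hx ⊢; tauto))

-- main correspondence between A's scan-and-break and B's keyed min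
theorem pvMain (ps : List (List String)) (m0 : String) (rest : List String) :
    some ((pvLoopA ps (m0 :: rest)).getD m0) = rest.foldl (pvStep (pvRankP ps)) (some m0) := by
  induction ps with
  | nil =>
    have : pvRankP [] m0 = 0 := rfl
    rw [pvStay_zero (pvRankP []) rest m0 this]
    rfl
  | cons p ps ih =>
    cases h : (m0 :: rest).find? (fun m => pvMatches p m) with
    | some m =>
      have hpred : (fun x => pvRankP (p :: ps) x == 0) = (fun m => pvMatches p m) := by
        funext x
        by_cases hx : pvMatches p x
        · simp [pvRankP, List.findIdx_cons, hx]
        · simp [pvRankP, List.findIdx_cons, hx]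
      rw [pvMin_first_zero (pvRankP (p :: ps)) rest m0 m (by rw [hpred]; exact h)]
      simp [pvLoopA, h]
    | none =>
      have hall := List.find?_eq_none.mp h
      have hshift : ∀ x ∈ m0 :: rest, pvRankP (p :: ps) x = pvRankP ps x + 1 := by
        intro x hx
        have : ¬ pvMatches p x = true := hall x hx
        simp [pvRankP, List.findIdx_cons, this]
      rw [pvMin_shift _ _ rest m0 hshift]
      rw [← ih]
      simp [pvLoopA, h]

-- ===== VERDICT (by name: the statement is the Claim_ definition above) =====
theorem pick_best_local_model_spec : Claim_equal_pick_best_local_model := by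
  intro models _
  unfold Spec_pick_best_local_model
  cases models with
  | nil => rfl
  | cons m0 rest =>
    simp only [pick_best_local_model, pick_best_local_model_alt, pvMin?_eq, List.foldl_cons]
    have hstep : pvStep pvRank none m0 = some m0 := rfl
    rw [hstep]
    have : pvRank = pvRankP pvPriorities := rfl
    rw [this, ← pvMain pvPriorities m0 rest]
    rfl
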